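-- pv_equiv track=rewrite | github.com/serenomoon/UTN---TUP | Programacion/Ejercicios/7-Guia Ordenamientos/ordenamiento.py | intercalar_vectores
-- ===== SOURCE A (Python) =====
-- def intercalar_vectores(array1: list, array2: list, opcional: bool = False) -> list:
--     nuevo_array = [None for _ in range(len(array1)+len(array2))]
--     for i in range(len(array1)):
--         nuevo_array[i*2] = array1[i]
--         nuevo_array[i*2+1] = array2[i]
--     for i in range(len(nuevo_array)-1):
--         for j in range(i+1,len(nuevo_array)):
--             if not opcional:
--                 if nuevo_array[i] > nuevo_array[j]:
--                     auxiliar = nuevo_array[i]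
--                     nuevo_array[i] = nuevo_array[j]
--                     nuevo_array[j] = auxiliar
--             else:
--                 if nuevo_array[i] < nuevo_array[j]:
--                     auxiliar = nuevo_array[i]
--                     nuevo_array[i] = nuevo_array[j]
--                     nuevo_array[j] = auxiliar
--
--     return nuevo_array
-- ===== SOURCE B (Python) =====
-- def intercalar_vectores(array1: list, array2: list, opcional: bool = False) -> list:
--     # The interleaving only fixes which multiset is sorted; sorting the
--     # concatenation gives the same ascending/descending result.
--     return sorted(array1 + array2, reverse=opcional)
-- ===== Notes on version B (the rewrite author's own statement) =====
-- stated objective: faster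
-- what changed: Replaces the interleave-into-holes fill plus O(n^2) nested compare-swap loops with a single sorted(array1 + array2, reverse=opcional) call, since the interleaving order is irrelevant once the list is fully sorted.
-- outside the precondition, e.g. on intercalar_vectores([], [5], False): A returns [None], B returns [5]
-- crash fix: When the lists have different lengths (except array1=[] with len(array2)==1), A raises IndexError (array2 too short) or TypeError (None holes get compared); B returns the sorted concatenation. — e.g. on intercalar_vectores([1], [], false): A raises IndexError, B returns [1]
import Mathlib
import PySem

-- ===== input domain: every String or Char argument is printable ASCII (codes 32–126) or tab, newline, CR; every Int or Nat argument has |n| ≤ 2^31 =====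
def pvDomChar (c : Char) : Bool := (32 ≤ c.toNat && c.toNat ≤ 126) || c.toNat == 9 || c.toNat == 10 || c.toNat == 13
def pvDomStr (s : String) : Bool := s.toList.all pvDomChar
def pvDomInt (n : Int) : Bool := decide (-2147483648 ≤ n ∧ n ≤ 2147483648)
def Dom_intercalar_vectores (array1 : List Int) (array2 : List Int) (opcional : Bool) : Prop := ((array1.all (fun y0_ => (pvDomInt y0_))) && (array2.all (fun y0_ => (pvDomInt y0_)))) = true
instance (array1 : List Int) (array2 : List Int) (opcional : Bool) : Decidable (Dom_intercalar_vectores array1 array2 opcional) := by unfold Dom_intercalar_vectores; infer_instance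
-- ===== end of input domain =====

-- B replaces A's hole-filling interleave plus O(n^2) nested compare-swap loops by one
-- sorted(array1 + array2, reverse=opcional) call (the interleave order is irrelevant
-- once the list is fully sorted); proved equal where A returns an int list (equal lengths).

-- ===== PORT A =====
-- comparison chosen by `opcional` (the two if-branches of A's inner loop)
def pvCmp (opcional : Bool) (a b : Int) : Bool :=
  if opcional then decide (a < b) else decide (a > b)

-- one iteration of A's inner loop: compare-swap positions i and j
-- (Python: aux = a[i]; a[i] = a[j]; a[j] = aux — both reads before the writes)
def pvSwapAt (opcional : Bool) (l : List Int) (i j : Nat) : List Int :=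
  if pvCmp opcional (l.getD i 0) (l.getD j 0) then
    (l.set i (l.getD j 0)).set j (l.getD i 0)
  else l

def intercalar_vectores (array1 : List Int) (array2 : List Int) (opcional : Bool) : List Int :=
  let n := array1.length + array2.length
  -- [None for _ in range(n)]: 0 stands for the None placeholder; Pre_ guarantees every
  -- slot is overwritten before it is read or returned (otherwise Python raises / returns non-ints)
  let init : List Int := List.replicate n 0
  -- for i in range(len(array1)): nuevo[i*2] = array1[i]; nuevo[i*2+1] = array2[i]
  -- (array2[i] out of range raises IndexError in Python: excluded by Pre_)
  let filled := (List.range array1.length).foldl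
    (fun acc i => (acc.set (i*2) (array1.getD i 0)).set (i*2+1) (array2.getD i 0)) init
  -- for i in range(n-1): for j in range(i+1, n): compare-swap   (range(i+1,n) = range' (i+1) (n-(i+1)))
  (List.range (n-1)).foldl
    (fun acc i => (List.range' (i+1) (n - (i+1))).foldl
      (fun acc2 j => pvSwapAt opcional acc2 i j) acc)
    filled

-- ===== PORT B =====
def intercalar_vectores_alt (array1 : List Int) (array2 : List Int) (opcional : Bool) : List Int :=
  PySem.List.sorted (array1 ++ array2) (fun x => x) opcional

-- ===== PRECONDITION & SPEC =====
-- Pre_ keeps exactly the inputs where A returns a list of ints: with unequal lengths A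
-- raises IndexError/TypeError, except array1=[] with a singleton array2, where it
-- returns [None] — not a value of the declared int-list type.
def Pre_intercalar_vectores (array1 : List Int) (array2 : List Int) (opcional : Bool) : Prop :=
  array1.length = array2.length
instance (array1 : List Int) (array2 : List Int) (opcional : Bool) : Decidable (Pre_intercalar_vectores array1 array2 opcional) := by unfold Pre_intercalar_vectores; infer_instance
def pvWitness_intercalar_vectores : List Int × List Int × Bool := ([3, 1], [2, 4], false)

-- When the lists have different lengths (except array1=[] with len(array2)==1), A raises
-- IndexError (array2 too short) or TypeError (None holes get compared); B returns the
-- sorted concatenation.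
def Raises_intercalar_vectores (array1 : List Int) (array2 : List Int) (opcional : Bool) : Prop :=
  array1.length ≠ array2.length ∧ ¬(array1 = [] ∧ array2.length = 1)
instance (array1 : List Int) (array2 : List Int) (opcional : Bool) : Decidable (Raises_intercalar_vectores array1 array2 opcional) := by unfold Raises_intercalar_vectores; infer_instance
def pvRaiseWitness_intercalar_vectores : List Int × List Int × Bool := ([1], [], false)
def pvRaiseWitnessOut_intercalar_vectores : List Int := [1]

def Spec_intercalar_vectores (array1 : List Int) (array2 : List Int) (opcional : Bool) (out : List Int) : Prop := out = intercalar_vectores_alt array1 array2 opcional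
instance (array1 : List Int) (array2 : List Int) (opcional : Bool) (out : List Int) : Decidable (Spec_intercalar_vectores array1 array2 opcional out) := by unfold Spec_intercalar_vectores; infer_instance

-- ===== CLAIM (what is proved, stated in full; the proofs are below) =====
def Claim_equal_intercalar_vectores : Prop := ∀ (array1 : List Int) (array2 : List Int) (opcional : Bool), Dom_intercalar_vectores array1 array2 opcional → Pre_intercalar_vectores array1 array2 opcional → Spec_intercalar_vectores array1 array2 opcional (intercalar_vectores array1 array2 opcional)
def Claim_raises_intercalar_vectores : Prop := (∀ (array1 : List Int) (array2 : List Int) (opcional : Bool), Dom_intercalar_vectores array1 array2 opcional → Raises_intercalar_vectores array1 array2 opcional → ¬ Pre_intercalar_vectores array1 array2 opcional) ∧ (Dom_intercalar_vectores (pvRaiseWitness_intercalar_vectores.1) (pvRaiseWitness_intercalar_vectores.2.1) (pvRaiseWitness_intercalar_vectores.2.2) ∧ Raises_intercalar_vectores (pvRaiseWitness_intercalar_vectores.1) (pvRaiseWitness_intercalar_vectores.2.1) (pvRaiseWitness_intercalar_vectores.2.2) ∧ intercalar_vectores_alt (pvRaiseWitness_intercalar_vectores.1) (pvRaiseWitness_intercalar_vectores.2.1)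 (pvRaiseWitness_intercalar_vectores.2.2) = pvRaiseWitnessOut_intercalar_vectores)

-- ===== LEMMAS AND PROOFS =====

-- ---- the order chosen by `opcional`, as a Prop, and its basic facts ----
def pvLe (opcional : Bool) (a b : Int) : Prop := if opcional then b ≤ a else a ≤ b

lemma pvLe_refl (op : Bool) (a : Int) : pvLe op a a := by unfold pvLe; split <;> omega

lemma pvLe_trans (op : Bool) {a b c : Int} (h1 : pvLe op a b) (h2 : pvLe op b c) : pvLe op a c := by
  unfold pvLe at *; split at h1 <;> simp_all <;> omega

lemma pvLe_of_cmp {op : Bool} {a b : Int} (h : pvCmp op a b = true) : pvLe op b a := by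
  unfold pvCmp at h; unfold pvLe; split at h <;> simp_all <;> omega

lemma pvLe_of_not_cmp {op : Bool} {a b : Int} (h : pvCmp op a b = false) : pvLe op a b := by
  unfold pvCmp at h; unfold pvLe; split at h <;> simp_all

-- ---- A's inner loop, structurally: carry the value at position i rightwards,
-- ---- returning the final (minimal) value and the modified suffix ----
def pvSelect (op : Bool) : Int → List Int → Int × List Int
  | x, [] => (x, [])
  | x, y :: ys =>
    if pvCmp op x y then
      let r := pvSelect op y ys; (r.1, x :: r.2)
    else
      let r := pvSelect op x ys; (r.1, y :: r.2)

lemma pvSelect_len (op : Bool) : ∀ (x : Int) (s : List Int), (pvSelect op x s).2.length = s.length := by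
  intro x s
  induction s generalizing x with
  | nil => rfl
  | cons y ys ih => simp only [pvSelect]; split <;> simp [ih]

-- A's whole sort, structurally: repeatedly select the extremal element to the front
def pvSelSort (op : Bool) : List Int → List Int
  | [] => []
  | x :: xs =>
    let r := pvSelect op x xs
    r.1 :: pvSelSort op r.2
termination_by l => l.length
decreasing_by simp [pvSelect_len]

-- the interleaved list A builds (for equal-length inputs)
def pvInterleave : List Int → List Int → List Int
  | x :: xs, y :: ys => x :: y :: pvInterleave xs ys
  | _, _ => []

-- ---- list-surgery helpers ----
lemma pvGetD_append_cons (pre : List Int) (z : Int) (t : List Int) :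
    (pre ++ z :: t).getD pre.length 0 = z := by
  induction pre with
  | nil => rfl
  | cons a l ih => simp [ih]

lemma pvSet_append_cons (pre : List Int) (z v : Int) (t : List Int) :
    (pre ++ z :: t).set pre.length v = pre ++ v :: t := by
  induction pre with
  | nil => rfl
  | cons a l ih => simp [ih]

-- ---- bridge: the fill loop builds pvInterleave ----
lemma pvFill_bridge (a1 a2 : List Int) :
    ∀ (m k : Nat) (done : List Int), done.length = k * 2 → k + m = a1.length → k + m = a2.length →
    (List.range' k m).foldl
      (fun acc i => (acc.set (i*2) (a1.getD i 0)).set (i*2+1) (a2.getD i 0))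
      (done ++ List.replicate (m*2) 0)
    = done ++ pvInterleave (a1.drop k) (a2.drop k) := by
  intro m
  induction m with
  | zero =>
    intro k done hd h1 h2
    simp only [List.range'_zero, List.foldl_nil, Nat.zero_mul, List.replicate_zero, List.append_nil]
    have e1 : a1.drop k = [] := by rw [List.drop_eq_nil_iff]; omega
    have e2 : a2.drop k = [] := by rw [List.drop_eq_nil_iff]; omega
    rw [e1, e2]; simp [pvInterleave]
  | succ m ih =>
    intro k done hd h1 h2
    have hk1 : k < a1.length := by omega
    have hk2 : k < a2.length := by omega
    have hrep : List.replicate ((m+1)*2) (0 : Int) = 0 :: 0 :: List.replicate (m*2) 0 := by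
      have : (m+1)*2 = m*2 + 1 + 1 := by ring
      simp [this, List.replicate_succ]
    rw [List.range'_succ, List.foldl_cons, hrep]
    have hset1 : ((done ++ 0 :: 0 :: List.replicate (m*2) (0:Int)).set (k*2) (a1.getD k 0))
        = done ++ a1.getD k 0 :: 0 :: List.replicate (m*2) 0 := by
      rw [← hd]; exact pvSet_append_cons done 0 _ _
    have hset2 : ((done ++ a1.getD k 0 :: 0 :: List.replicate (m*2) (0:Int)).set (k*2+1) (a2.getD k 0))
        = done ++ a1.getD k 0 :: a2.getD k 0 :: List.replicate (m*2) 0 := by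
      have : done ++ a1.getD k 0 :: 0 :: List.replicate (m*2) (0:Int)
           = (done ++ [a1.getD k 0]) ++ 0 :: List.replicate (m*2) 0 := by simp
      rw [this]
      have hlen : (done ++ [a1.getD k 0]).length = k*2+1 := by simp [hd]
      rw [← hlen, pvSet_append_cons]; simp
    rw [hset1, hset2]
    have : done ++ a1.getD k 0 :: a2.getD k 0 :: List.replicate (m*2) (0:Int)
         = (done ++ [a1.getD k 0, a2.getD k 0]) ++ List.replicate (m*2) 0 := by simp
    rw [this, ih (k+1) _ (by simp [hd]; ring) (by omega) (by omega)]
    have d1 : a1.drop k = a1.getD k 0 :: a1.drop (k+1) := by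
      rw [List.getD_eq_getElem a1 0 hk1]; exact List.drop_eq_getElem_cons hk1
    have d2 : a2.drop k = a2.getD k 0 :: a2.drop (k+1) := by
      rw [List.getD_eq_getElem a2 0 hk2]; exact List.drop_eq_getElem_cons hk2
    rw [d1, d2]; simp [pvInterleave]

lemma pvInterleave_perm : ∀ (a1 a2 : List Int), a1.length = a2.length →
    (pvInterleave a1 a2).Perm (a1 ++ a2) := by
  intro a1
  induction a1 with
  | nil =>
    intro a2 h
    have h2 : a2 = [] := by simpa using h.symm
    subst h2; simp [pvInterleave]
  | cons x xs ih =>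
    intro a2 h
    cases a2 with
    | nil => simp at h
    | cons y ys =>
      show (x :: y :: pvInterleave xs ys).Perm ((x :: xs) ++ y :: ys)
      have hp := ih ys (by simpa using h)
      exact ((hp.cons y).trans List.perm_middle.symm).cons x

-- ---- bridge: one inner j-loop equals pvSelect ----
lemma pvInner_bridge (op : Bool) (pre : List Int) :
    ∀ (suf mid : List Int) (x : Int),
    (List.range' (pre.length + 1 + mid.length) suf.length).foldl
      (fun acc j => pvSwapAt op acc pre.length j)
      (pre ++ x :: (mid ++ suf))
    = pre ++ (pvSelect op x suf).1 :: (mid ++ (pvSelect op x suf).2) := by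
  intro suf
  induction suf with
  | nil => intro mid x; simp [pvSelect]
  | cons y ys ih =>
    intro mid x
    rw [List.length_cons, List.range'_succ]
    simp only [List.foldl_cons]
    have hx : (pre ++ x :: (mid ++ y :: ys)).getD pre.length 0 = x := pvGetD_append_cons _ _ _
    have hy : (pre ++ x :: (mid ++ y :: ys)).getD (pre.length + 1 + mid.length) 0 = y := by
      have hshape : pre ++ x :: (mid ++ y :: ys) = (pre ++ x :: mid) ++ y :: ys := by simp
      have hlen : (pre ++ x :: mid).length = pre.length + 1 + mid.length := by simp; omega
      rw [hshape, ← hlen]; exact pvGetD_append_cons _ _ _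
    by_cases hc : pvCmp op x y
    · have hhead : pvSwapAt op (pre ++ x :: (mid ++ y :: ys)) pre.length (pre.length + 1 + mid.length)
          = pre ++ y :: ((mid ++ [x]) ++ ys) := by
        unfold pvSwapAt
        rw [hx, hy, if_pos hc, pvSet_append_cons]
        have h2 : pre ++ y :: (mid ++ y :: ys) = (pre ++ y :: mid) ++ y :: ys := by simp
        have hl2 : (pre ++ y :: mid).length = pre.length + 1 + mid.length := by simp; omega
        rw [h2, ← hl2, pvSet_append_cons]; simp
      rw [hhead,
        show pre.length + 1 + mid.length + 1 = pre.length + 1 + (mid ++ [x]).length by simp; omega,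
        ih (mid ++ [x]) y]
      simp only [pvSelect, if_pos hc]
      simp
    · have hcf : pvCmp op x y = false := by simpa using hc
      have hhead : pvSwapAt op (pre ++ x :: (mid ++ y :: ys)) pre.length (pre.length + 1 + mid.length)
          = pre ++ x :: ((mid ++ [y]) ++ ys) := by
        unfold pvSwapAt
        rw [hx, hy, hcf]; simp
      rw [hhead,
        show pre.length + 1 + mid.length + 1 = pre.length + 1 + (mid ++ [y]).length by simp; omega,
        ih (mid ++ [y]) x]
      simp only [pvSelect, hcf]
      simp

-- ---- bridge: the outer i-loop equals pvSelSort ----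
lemma pvOuter_bridge (op : Bool) (n : Nat) :
    ∀ (m : Nat) (rest pre : List Int), rest.length = m → pre.length + m = n →
    (List.range' pre.length (m - 1)).foldl
      (fun acc i => (List.range' (i+1) (n - (i+1))).foldl
        (fun acc2 j => pvSwapAt op acc2 i j) acc)
      (pre ++ rest)
    = pre ++ pvSelSort op rest := by
  intro m
  induction m using Nat.strong_induction_on with
  | _ m ih =>
    intro rest pre hm hn
    match rest, hm with
    | [], hm => simp [← hm, pvSelSort]
    | [x], hm => simp [← hm, pvSelSort, pvSelect]
    | x :: y :: ys, hm =>
      have hm2 : m - 1 = (y :: ys).length - 1 + 1 := by simp at hm ⊢; omega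
      rw [hm2, List.range'_succ, List.foldl_cons]
      have hcnt : n - (pre.length + 1) = (y :: ys).length := by simp at hm ⊢; omega
      have hinner := pvInner_bridge op pre (y :: ys) [] x
      simp only [List.length_nil, Nat.add_zero, List.nil_append] at hinner
      rw [hcnt, hinner]
      have hre : pre ++ (pvSelect op x (y :: ys)).1 :: (pvSelect op x (y :: ys)).2
               = (pre ++ [(pvSelect op x (y :: ys)).1]) ++ (pvSelect op x (y :: ys)).2 := by simp
      have hlsel : (pvSelect op x (y :: ys)).2.length = (y :: ys).length := pvSelect_len op x _
      have hplen : (pre ++ [(pvSelect op x (y :: ys)).1]).length = pre.length + 1 := by simp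
      have hstep := ih ((y :: ys).length) (by simp at hm ⊢; omega)
        (pvSelect op x (y :: ys)).2 (pre ++ [(pvSelect op x (y :: ys)).1]) hlsel
        (by simp at hm ⊢; omega)
      rw [hre, ← hplen] at *
      rw [hstep]
      conv_rhs => rw [pvSelSort]
      simp

-- ---- pvSelect / pvSelSort: permutation and order facts ----
lemma pvSelect_perm (op : Bool) : ∀ (x : Int) (s : List Int),
    ((pvSelect op x s).1 :: (pvSelect op x s).2).Perm (x :: s) := by
  intro x s
  induction s generalizing x with
  | nil => simp [pvSelect]
  | cons y ys ih =>
    simp only [pvSelect]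
    split
    · show ((pvSelect op y ys).1 :: x :: (pvSelect op y ys).2).Perm (x :: y :: ys)
      exact (List.Perm.swap x _ _).trans ((ih y).cons x)
    · show ((pvSelect op x ys).1 :: y :: (pvSelect op x ys).2).Perm (x :: y :: ys)
      exact ((List.Perm.swap y _ _).trans ((ih x).cons y)).trans (List.Perm.swap x y ys)

lemma pvSelect_le_seed (op : Bool) : ∀ (x : Int) (s : List Int), pvLe op (pvSelect op x s).1 x := by
  intro x s
  induction s generalizing x with
  | nil => exact pvLe_refl op x
  | cons y ys ih =>
    simp only [pvSelect]
    split
    · next hc => exact pvLe_trans op (ih y) (pvLe_of_cmp hc)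
    · exact ih x

lemma pvSelect_min (op : Bool) : ∀ (x : Int) (s : List Int),
    ∀ z ∈ (pvSelect op x s).2, pvLe op (pvSelect op x s).1 z := by
  intro x s
  induction s generalizing x with
  | nil => simp [pvSelect]
  | cons y ys ih =>
    simp only [pvSelect]
    split
    · next hc =>
      intro z hz
      rcases List.mem_cons.mp hz with rfl | hz
      · exact pvLe_trans op (pvSelect_le_seed op y ys) (pvLe_of_cmp hc)
      · exact ih y z hz
    · next hc =>
      intro z hz
      rcases List.mem_cons.mp hz with rfl | hz
      · exact pvLe_trans op (pvSelect_le_seed op x ys)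
          (pvLe_of_not_cmp (by simpa using hc))
      · exact ih x z hz

lemma pvSelSort_perm (op : Bool) : ∀ (l : List Int), (pvSelSort op l).Perm l := by
  intro l
  induction hn : l.length using Nat.strong_induction_on generalizing l with
  | _ n ih =>
    match l with
    | [] => simp [pvSelSort]
    | x :: xs =>
      rw [pvSelSort]
      have h1 : (pvSelSort op (pvSelect op x xs).2).Perm (pvSelect op x xs).2 :=
        ih ((pvSelect op x xs).2.length) (by simp [pvSelect_len op x xs, ← hn]) _ rfl
      exact (h1.cons _).trans (pvSelect_perm op x xs)

lemma pvSelSort_pairwise (op : Bool) : ∀ (l : List Int), (pvSelSort op l).Pairwise (pvLe op) := by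
  intro l
  induction hn : l.length using Nat.strong_induction_on generalizing l with
  | _ n ih =>
    match l with
    | [] => simp [pvSelSort]
    | x :: xs =>
      rw [pvSelSort]
      refine List.Pairwise.cons ?_ (ih ((pvSelect op x xs).2.length)
        (by simp [pvSelect_len op x xs, ← hn]) _ rfl)
      intro z hz
      have : z ∈ (pvSelect op x xs).2 := (pvSelSort_perm op _).mem_iff.mp hz
      exact pvSelect_min op x xs z this

-- descending counterpart of PySem's sorted_id_eq_of_perm_of_pairwise
lemma pvSorted_rev_id_eq (xs ys : List Int) (hp : ys.Perm xs)
    (hpw : ys.Pairwise (fun a b => b ≤ a)) :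
    PySem.List.sorted xs (fun x => x) true = ys := by
  have h := PySem.List.eq_of_perm_of_pairwise_le_of_injective
    (l₁ := (PySem.List.sorted xs (fun x => x) true).reverse) (l₂ := ys.reverse)
    (fun x : Int => x) (fun a b h => h)
    ((List.reverse_perm _).trans (((PySem.List.sorted_perm xs _ true).trans hp.symm).trans
      (List.reverse_perm ys).symm))
    (List.pairwise_reverse.mpr (PySem.List.sorted_pairwise_rev xs _))
    (List.pairwise_reverse.mpr hpw)
  exact List.reverse_injective h

-- the port of A computes pvSelSort of the interleaving
lemma pvPortA_eq (a1 a2 : List Int) (op : Bool) (h : a1.length = a2.length) :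
    intercalar_vectores a1 a2 op = pvSelSort op (pvInterleave a1 a2) := by
  unfold intercalar_vectores
  have hfill : (List.range a1.length).foldl
      (fun acc i => (acc.set (i*2) (a1.getD i 0)).set (i*2+1) (a2.getD i 0))
      (List.replicate (a1.length + a2.length) 0)
      = pvInterleave a1 a2 := by
    have hrep : a1.length + a2.length = a1.length * 2 := by omega
    have := pvFill_bridge a1 a2 a1.length 0 [] (by simp) (by omega) (by omega)
    simpa [List.range_eq_range', hrep] using this
  simp only [hfill]
  have hlen : (pvInterleave a1 a2).length = a1.length + a2.length :=
    ((pvInterleave_perm a1 a2 h).length_eq).trans (by simp)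
  have := pvOuter_bridge op (a1.length + a2.length) (a1.length + a2.length)
    (pvInterleave a1 a2) [] hlen (by simp)
  simpa [List.range_eq_range', hlen] using this

-- ===== VERDICT (by name: the statement is the Claim_ definition above) =====
theorem intercalar_vectores_spec : Claim_equal_intercalar_vectores := by
  intro a1 a2 op _ hpre
  unfold Spec_intercalar_vectores intercalar_vectores_alt
  rw [pvPortA_eq a1 a2 op hpre]
  have hperm : (pvSelSort op (pvInterleave a1 a2)).Perm (a1 ++ a2) :=
    (pvSelSort_perm op _).trans (pvInterleave_perm a1 a2 hpre)
  have hpw := pvSelSort_pairwise op (pvInterleave a1 a2)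
  cases op with
  | false =>
    exact (PySem.List.sorted_id_eq_of_perm_of_pairwise (a1 ++ a2) _ hperm
      (by simpa [pvLe] using hpw)).symm
  | true =>
    exact (pvSorted_rev_id_eq (a1 ++ a2) _ hperm (by simpa [pvLe] using hpw)).symm

@[simp]
theorem intercalar_vectores_raises : Claim_raises_intercalar_vectores := by
  unfold Claim_raises_intercalar_vectores
  exact ⟨fun a1 a2 op _ hr hp => hr.1 hp, by decide⟩
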